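-- pv_equiv track=rewrite | github.com/jramseygreen/Simple-Blackjack | blackjack.py | makedeck
-- ===== SOURCE A (Python) =====
-- def makedeck(n):
--     deck=[]
--     for i in range(n):
--         for n in range(13):
--             #special cards
--             if n==0:
--                 deck.append("cA")
--                 deck.append("hA")
--                 deck.append("sA")
--                 deck.append("dA")
--             elif n==10:
--                 deck.append("cJ")
--                 deck.append("hJ")
--                 deck.append("sJ")
--                 deck.append("dJ")
--             elif n==11:
--                 deck.append("cQ")
--                 deck.append("hQ")
--                 deck.append("sQ")
--                 deck.append("dQ")
--             elif n==12:
--                 deck.append("cK")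
--                 deck.append("hK")
--                 deck.append("sK")
--                 deck.append("dK")
--             #regular cards
--             else:
--                 deck.append("c"+str(n+1))
--                 deck.append("h"+str(n+1))
--                 deck.append("s"+str(n+1))
--                 deck.append("d"+str(n+1))
--
--     return deck;
-- ===== SOURCE B (Python) =====
-- def makedeck(n):
--     ranks = ['A', '2', '3', '4', '5', '6', '7', '8', '9', '10', 'J', 'Q', 'K']
--     suits = ['c', 'h', 's', 'd']
--     template = [s + r for r in ranks for s in suits]
--     return template * n
-- ===== Notes on version B (the rewrite author's own statement) =====
-- stated objective: simpler
-- what changed: Replaces the n-times re-executed 13-way if/elif chain (with str(n+1) conversions) by one 52-card template built from rank and suit lists via a comprehension, replicated with list multiplication.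
import Mathlib
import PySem

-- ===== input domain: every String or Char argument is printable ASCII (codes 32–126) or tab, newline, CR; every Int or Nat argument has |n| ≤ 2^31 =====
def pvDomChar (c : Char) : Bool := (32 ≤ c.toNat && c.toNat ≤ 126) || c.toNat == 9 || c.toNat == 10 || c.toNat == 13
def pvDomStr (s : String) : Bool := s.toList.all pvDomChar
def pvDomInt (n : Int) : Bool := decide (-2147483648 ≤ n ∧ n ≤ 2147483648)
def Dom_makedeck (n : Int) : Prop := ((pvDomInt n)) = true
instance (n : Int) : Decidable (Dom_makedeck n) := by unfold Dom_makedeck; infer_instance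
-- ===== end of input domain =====

-- ===== PORT A =====
-- One inner-loop iteration of A: the four appends of the branch taken for k.
def mdCard (k : Int) : List String :=
  if k = 0 then ["cA", "hA", "sA", "dA"]
  else if k = 10 then ["cJ", "hJ", "sJ", "dJ"]
  else if k = 11 then ["cQ", "hQ", "sQ", "dQ"]
  else if k = 12 then ["cK", "hK", "sK", "dK"]
  else ["c" ++ PySem.Int.toStr (k+1), "h" ++ PySem.Int.toStr (k+1),
        "s" ++ PySem.Int.toStr (k+1), "d" ++ PySem.Int.toStr (k+1)]

def makedeck (n : Int) : List String :=
  (PySem.List.pyRange 0 n 1).foldl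
    (fun deck _ => (PySem.List.pyRange 0 13 1).foldl (fun d k => d ++ mdCard k) deck) []

-- ===== PORT B =====
def mdRanks : List String := ["A", "2", "3", "4", "5", "6", "7", "8", "9", "10", "J", "Q", "K"]
def mdSuits : List String := ["c", "h", "s", "d"]
def mdTemplate : List String := mdRanks.flatMap (fun r => mdSuits.map (fun s => s ++ r))

def makedeck_alt (n : Int) : List String := (List.replicate n.toNat mdTemplate).flatten

-- ===== PRECONDITION & SPEC =====
def Spec_makedeck (n : Int) (out : List String) : Prop := out = makedeck_alt n
instance (n : Int) (out : List String) : Decidable (Spec_makedeck n out) := by unfold Spec_makedeck; infer_instance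

-- ===== CLAIM (what is proved, stated in full; the proofs are below) =====
def Claim_equal_makedeck : Prop := ∀ (n : Int), Dom_makedeck n → Spec_makedeck n (makedeck n)

-- ===== LEMMAS AND PROOFS =====
lemma md_inner_eq (d : List String) :
    (PySem.List.pyRange 0 13 1).foldl (fun d k => d ++ mdCard k) d = d ++ mdTemplate := by
  have h : (PySem.List.pyRange 0 13 1).foldl (fun d k => d ++ mdCard k) [] = mdTemplate := by decide
  have step : ∀ (l : List Int) (d : List String),
      l.foldl (fun d k => d ++ mdCard k) d = d ++ l.foldl (fun d k => d ++ mdCard k) [] := by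
    intro l
    induction l with
    | nil => simp
    | cons x xs ih =>
      intro d
      simp only [List.foldl_cons, List.nil_append]
      rw [ih (d ++ mdCard x), ih (mdCard x), List.append_assoc]
  rw [step, h]

lemma md_outer (l : List Int) (d : List String) :
    l.foldl (fun deck _ => (PySem.List.pyRange 0 13 1).foldl (fun d k => d ++ mdCard k) deck) d
      = d ++ (List.replicate l.length mdTemplate).flatten := by
  induction l generalizing d with
  | nil => simp
  | cons x xs ih =>
    simp only [List.foldl_cons, List.length_cons, List.replicate_succ, List.flatten_cons]
    rw [md_inner_eq, ih, List.append_assoc]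

-- ===== VERDICT (by name: the statement is the Claim_ definition above) =====
theorem makedeck_spec : Claim_equal_makedeck := by
  intro n _
  unfold Spec_makedeck makedeck makedeck_alt
  rw [md_outer, PySem.List.length_pyRange_one]
  simp
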